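-- pv_equiv track=rewrite | github.com/TLado/ElektromagnesesSugarzas_DigiProjektek | archivált/procedural_room_generation.py | _layout_rows
-- ===== SOURCE A (Python) =====
-- EXPORT_CELL_SIZE_M = 0.25
--
-- DESK_W = 6   # ~1.5 m
--
-- DESK_H = 3   # ~0.75 m
--
-- def meters_to_cells(meters: float) -> int:
--     return max(1, int(round(meters / EXPORT_CELL_SIZE_M)))
--
-- def _layout_rows(n, x_start, x_end, y_start, y_end):
--     """Asztalok sorokban, DESK_W + gap közzel."""
--     positions = []
--     gap_x = meters_to_cells(0.8)   # asztalok közötti folyosó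
--     gap_y = meters_to_cells(1.2)   # sorok közötti folyosó
--     step_x = DESK_W + gap_x
--     step_y = DESK_H + gap_y
--     cols = max(1, (x_end - x_start) // step_x)
--     for i in range(n):
--         col = i % cols
--         row = i // cols
--         x = x_start + col * step_x
--         y = y_start + row * step_y
--         positions.append((x, y))
--     return positions
-- ===== SOURCE B (Python) =====
-- EXPORT_CELL_SIZE_M = 0.25
-- DESK_W = 6
-- DESK_H = 3
--
-- def meters_to_cells(meters: float) -> int:
--     return max(1, int(round(meters / EXPORT_CELL_SIZE_M)))
--
-- def _layout_rows(n, x_start, x_end, y_start, y_end):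
--     """Asztalok sorokban, DESK_W + gap közzel."""
--     step_x = DESK_W + meters_to_cells(0.8)
--     step_y = DESK_H + meters_to_cells(1.2)
--     cols = max(1, (x_end - x_start) // step_x)
--     positions = []
--     remaining = n
--     row = 0
--     while remaining > 0:
--         y = y_start + row * step_y
--         for col in range(min(cols, remaining)):
--             positions.append((x_start + col * step_x, y))
--         remaining -= cols
--         row += 1
--     return positions
-- ===== Notes on version B (the rewrite author's own statement) =====
-- stated objective: alternative
-- what changed: Replaces the flat index loop that recovers row/column via i%cols and i//cols with an explicit two-level row-then-column traversal driven by a remaining counter, with no division or modulo in the loop.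
import Mathlib
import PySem

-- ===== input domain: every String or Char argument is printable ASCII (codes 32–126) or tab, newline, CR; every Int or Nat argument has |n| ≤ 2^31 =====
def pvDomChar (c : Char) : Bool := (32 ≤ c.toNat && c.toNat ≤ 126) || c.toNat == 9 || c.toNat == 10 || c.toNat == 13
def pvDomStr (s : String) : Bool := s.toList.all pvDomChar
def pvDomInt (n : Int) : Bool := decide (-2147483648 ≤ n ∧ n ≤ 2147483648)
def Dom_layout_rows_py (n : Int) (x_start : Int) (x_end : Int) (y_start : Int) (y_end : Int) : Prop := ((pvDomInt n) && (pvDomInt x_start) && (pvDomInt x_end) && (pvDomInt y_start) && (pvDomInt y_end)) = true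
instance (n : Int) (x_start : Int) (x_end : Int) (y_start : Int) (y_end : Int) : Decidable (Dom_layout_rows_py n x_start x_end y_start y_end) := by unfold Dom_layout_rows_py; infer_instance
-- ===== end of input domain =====

-- B replaces A's flat index loop with i%cols / i//cols arithmetic by an explicit
-- row-then-column nested traversal driven by a remaining counter (alternative decomposition, same cost).


-- ===== PORT A =====
-- meters_to_cells(0.8) = 3 and meters_to_cells(1.2) = 5: pure float constants in A,
-- ported as the integer literals they evaluate to (exact: round(3.2)=3, round(4.8)=5).
def layout_rows_py (n : Int) (x_start : Int) (x_end : Int) (y_start : Int) (_y_end : Int) : List (Int × Int) :=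
  let gap_x : Int := 3
  let gap_y : Int := 5
  let step_x : Int := 6 + gap_x
  let step_y : Int := 3 + gap_y
  let cols : Int := max 1 (PySem.Int.floordiv (x_end - x_start) step_x)
  (PySem.List.pyRange 0 n 1).foldl (fun acc i =>
    acc ++ [(x_start + (PySem.Int.mod i cols) * step_x,
             y_start + (PySem.Int.floordiv i cols) * step_y)]) []

-- ===== PORT B =====
-- B's while-loop over `remaining`: ported with remaining as a Nat (the Python loop only
-- runs while remaining > 0, so truncated subtraction is exact) and cols as c+1 (cols ≥ 1 always).
def altLoop (c : Nat) (xs ys sx sy : Int) : Nat → Int → List (Int × Int)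
  | rem, row =>
    if rem = 0 then []
    else
      ((List.range (min (c + 1) rem)).map (fun (col : Nat) => (xs + (col : Int) * sx, ys + row * sy)))
        ++ altLoop c xs ys sx sy (rem - (c + 1)) (row + 1)

def layout_rows_py_alt (n : Int) (x_start : Int) (x_end : Int) (y_start : Int) (_y_end : Int) : List (Int × Int) :=
  let step_x : Int := 6 + 3
  let step_y : Int := 3 + 5
  let cols : Int := max 1 (PySem.Int.floordiv (x_end - x_start) step_x)
  altLoop (cols.toNat - 1) x_start y_start step_x step_y n.toNat 0

-- ===== PRECONDITION & SPEC =====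
def Spec_layout_rows_py (n : Int) (x_start : Int) (x_end : Int) (y_start : Int) (y_end : Int) (out : List (Int × Int)) : Prop := out = layout_rows_py_alt n x_start x_end y_start y_end
instance (n : Int) (x_start : Int) (x_end : Int) (y_start : Int) (y_end : Int) (out : List (Int × Int)) : Decidable (Spec_layout_rows_py n x_start x_end y_start y_end out) := by unfold Spec_layout_rows_py; infer_instance

-- ===== CLAIM (what is proved, stated in full; the proofs are below) =====
def Claim_equal_layout_rows_py : Prop := ∀ (n : Int) (x_start : Int) (x_end : Int) (y_start : Int) (y_end : Int), Dom_layout_rows_py n x_start x_end y_start y_end → Spec_layout_rows_py n x_start x_end y_start y_end (layout_rows_py n x_start x_end y_start y_end)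

-- ===== LEMMAS AND PROOFS =====

theorem foldl_append_map {α β : Type} (f : α → β) :
    ∀ (l : List α) (init : List β),
      l.foldl (fun acc x => acc ++ [f x]) init = init ++ l.map f := by
  intro l
  induction l with
  | nil => simp
  | cons x xs ih => intro init; simp [List.foldl, ih]

-- A's result as a map over List.range, with cols = c+1.
theorem portA_eq_map (n xs ys : Int) (c : Nat) :
    ((PySem.List.pyRange 0 n 1).foldl (fun acc i =>
      acc ++ [(xs + (PySem.Int.mod i ((c : Int) + 1)) * 9,
               ys + (PySem.Int.floordiv i ((c : Int) + 1)) * 8)]) [])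
    = (List.range n.toNat).map (fun i =>
        (xs + ((i % (c + 1) : Nat) : Int) * 9, ys + ((i / (c + 1) : Nat) : Int) * 8)) := by
  rw [foldl_append_map, PySem.List.pyRange_one]
  simp only [List.nil_append, List.map_map, Int.sub_zero]
  apply List.map_congr_left
  intro i _
  simp

-- B's loop as the same map, row offset accumulated.
theorem altLoop_eq_map (c : Nat) (xs ys sx sy : Int) :
    ∀ (rem : Nat) (row : Int),
      altLoop c xs ys sx sy rem row
      = (List.range rem).map (fun i =>
          (xs + ((i % (c + 1) : Nat) : Int) * sx,
           ys + (row + ((i / (c + 1) : Nat) : Int)) * sy)) := by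
  intro rem
  induction rem using Nat.strong_induction_on with
  | _ rem ih =>
    intro row
    rw [altLoop]
    by_cases h0 : rem = 0
    · simp [h0]
    · simp only [if_neg h0]
      by_cases hle : rem ≤ c + 1
      · have hmin : min (c + 1) rem = rem := by omega
        have hrec : rem - (c + 1) = 0 := by omega
        rw [hmin, hrec, altLoop]
        simp only [reduceIte, List.append_nil]
        apply List.map_congr_left
        intro i hi
        have hi' : i < rem := List.mem_range.mp hi
        have h1 : i % (c + 1) = i := Nat.mod_eq_of_lt (by omega)
        have h2 : i / (c + 1) = 0 := Nat.div_eq_of_lt (by omega)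
        simp [h1, h2]
      · have hsplit : rem = (c + 1) + (rem - (c + 1)) := by omega
        have hmin : min (c + 1) rem = c + 1 := by omega
        rw [hmin, ih (rem - (c + 1)) (by omega) (row + 1)]
        conv_rhs => rw [hsplit, List.range_add, List.map_append, List.map_map]
        congr 1
        · apply List.map_congr_left
          intro i hi
          have hi' : i < c + 1 := List.mem_range.mp hi
          have h1 : i % (c + 1) = i := Nat.mod_eq_of_lt hi'
          have h2 : i / (c + 1) = 0 := Nat.div_eq_of_lt hi'
          simp [h1, h2]
        · apply List.map_congr_left
          intro i _
          have h1 : (c + 1 + i) % (c + 1) = i % (c + 1) := Nat.add_mod_left _ _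
          have h2 : (c + 1 + i) / (c + 1) = i / (c + 1) + 1 := by
            rw [Nat.add_comm (c + 1) i, Nat.add_div_right _ (by omega)]
          simp only [Function.comp, h1, h2]
          refine Prod.ext rfl ?_
          push_cast
          ring

-- ===== VERDICT (by name: the statement is the Claim_ definition above) =====
theorem ports_agree (n xs ys cols : Int) (h1 : 1 ≤ cols) :
    (PySem.List.pyRange 0 n 1).foldl (fun acc i =>
      acc ++ [(xs + (PySem.Int.mod i cols) * 9, ys + (PySem.Int.floordiv i cols) * 8)]) []
    = altLoop (cols.toNat - 1) xs ys 9 8 n.toNat 0 := by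
  have hcast : cols = ((cols.toNat - 1 : Nat) : Int) + 1 := by omega
  rw [hcast, portA_eq_map, altLoop_eq_map]
  apply List.map_congr_left
  intro i _
  simp

theorem layout_rows_py_spec : Claim_equal_layout_rows_py := by
  intro n x_start x_end y_start y_end _
  show layout_rows_py n x_start x_end y_start y_end = layout_rows_py_alt n x_start x_end y_start y_end
  exact ports_agree n x_start y_start (max 1 (PySem.Int.floordiv (x_end - x_start) (6 + 3)))
    (le_max_left _ _)
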